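-- pv_equiv track=rewrite | github.com/felixludos/tnt | government-Atlas.py | opposite_knapsack
-- ===== SOURCE A (Python) =====
-- def opposite_knapsack(names, vals, cost, partial=[], sofar=0):
--
-- 	if len(names) == 0: # base case
-- 		return []
--
-- 	name, *remaining = names
--
-- 	val = vals[name] + sofar
-- 	candidate = partial + [name]
--
-- 	# recurse without current
-- 	sols = opposite_knapsack(remaining, vals, cost, partial=partial, sofar=sofar)
--
-- 	if val >= cost:
-- 		sols.append(candidate)
-- 	else:
-- 		# recurse with current
-- 		sols.extend(opposite_knapsack(remaining, vals, cost, partial=candidate, sofar=val))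
--
-- 	return sols
-- ===== SOURCE B (Python) =====
-- def opposite_knapsack(names, vals, cost, partial=[], sofar=0):
--     out = []
--     stack = [(list(names), list(partial), sofar, False)]
--     while stack:
--         ns, p, s, is_emit = stack.pop()
--         if is_emit:
--             out.append(p)
--             continue
--         if not ns:
--             continue
--         name, remaining = ns[0], ns[1:]
--         val = vals[name] + s
--         candidate = p + [name]
--         if val >= cost:
--             stack.append((None, candidate, 0, True))
--         else:
--             stack.append((remaining, candidate, val, False))
--         stack.append((remaining, p, s, False))
--     return out
-- ===== Notes on version B (the rewrite author's own statement) =====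
-- stated objective: alternative
-- what changed: Replaces A's binary recursion (recurse-without, then append candidate or recurse-with) by an iterative explicit-stack DFS with emit markers, pushing the current-branch item before the exclude-state so exclude is processed first, reproducing A's exact output order.
import Mathlib
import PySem

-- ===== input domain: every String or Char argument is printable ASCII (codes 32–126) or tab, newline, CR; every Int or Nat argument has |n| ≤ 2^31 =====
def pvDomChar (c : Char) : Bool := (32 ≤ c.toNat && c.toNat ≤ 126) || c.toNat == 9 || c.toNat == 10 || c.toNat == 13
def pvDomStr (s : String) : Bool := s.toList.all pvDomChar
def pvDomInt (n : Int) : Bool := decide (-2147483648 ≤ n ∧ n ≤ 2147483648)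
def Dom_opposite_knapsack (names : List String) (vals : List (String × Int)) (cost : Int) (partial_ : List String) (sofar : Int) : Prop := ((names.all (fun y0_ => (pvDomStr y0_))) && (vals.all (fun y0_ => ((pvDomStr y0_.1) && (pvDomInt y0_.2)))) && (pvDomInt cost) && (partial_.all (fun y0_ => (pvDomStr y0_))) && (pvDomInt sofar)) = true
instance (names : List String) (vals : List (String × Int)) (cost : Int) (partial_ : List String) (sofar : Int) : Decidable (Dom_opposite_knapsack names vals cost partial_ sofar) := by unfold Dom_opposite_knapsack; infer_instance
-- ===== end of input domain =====

-- B replaces A's recursion by an explicit stack-based DFS (emit markers + exclude-before-current push order); objective: alternative decomposition, same output list in the same order.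

-- ===== PORT A =====
-- literal port of A's recursion; where Python raises KeyError (name not in vals) the lookup
-- defaults to 0 — exactly those inputs are excluded by Pre_opposite_knapsack.
def opposite_knapsack (names : List String) (vals : List (String × Int)) (cost : Int) (partial_ : List String) (sofar : Int) : List (List String) :=
  match names with
  | [] => []
  | name :: remaining =>
    let val := ((PySem.Dict.mk vals).get? name).getD 0 + sofar
    let candidate := partial_ ++ [name]
    let sols := opposite_knapsack remaining vals cost partial_ sofar
    if val ≥ cost then
      sols ++ [candidate]
    else
      sols ++ opposite_knapsack remaining vals cost candidate val

-- ===== PORT B =====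
-- a work item of the DFS stack: a state (remaining names, partial, sofar) or an emit marker
inductive OkItem : Type
  | state : List String → List String → Int → OkItem
  | emit : List String → OkItem
deriving DecidableEq, Repr

def okItemWeight : OkItem → Nat
  | .emit _ => 1
  | .state ns _ _ => 3 ^ ns.length

def okStackWeight (items : List OkItem) : Nat := (items.map okItemWeight).sum

def okLoop (vals : List (String × Int)) (cost : Int) : List OkItem → List (List String) → List (List String)
  | [], out => out
  | .emit c :: rest, out => okLoop vals cost rest (out ++ [c])
  | .state [] _ _ :: rest, out => okLoop vals cost rest out
  | .state (name :: remaining) p s :: rest, out =>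
    let val := ((PySem.Dict.mk vals).get? name).getD 0 + s
    let candidate := p ++ [name]
    let cur := if val ≥ cost then OkItem.emit candidate else OkItem.state remaining candidate val
    okLoop vals cost (OkItem.state remaining p s :: cur :: rest) out
termination_by items _ => okStackWeight items
decreasing_by
  all_goals simp only [okStackWeight, List.map_cons, List.sum_cons, List.length_cons, okItemWeight]
  all_goals try simp
  all_goals
    (have hk : 1 ≤ 3 ^ remaining.length := Nat.one_le_pow _ _ (by norm_num)
     have h3 : (3:Nat) ^ (remaining.length + 1) = 3 * 3 ^ remaining.length := pow_succ' 3 _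
     rw [h3]
     split
     · omega
     · rename_i ns pp vv heq
       split at heq
       · simp at heq
       · injection heq with h1 h2 h3x
         subst h1
         omega)

def opposite_knapsack_alt (names : List String) (vals : List (String × Int)) (cost : Int) (partial_ : List String) (sofar : Int) : List (List String) :=
  okLoop vals cost [OkItem.state names partial_ sofar] []

-- ===== PRECONDITION & SPEC =====
-- Pre_ excludes exactly the inputs where Python A raises KeyError: some name in names is not a key of vals.
def Pre_opposite_knapsack (names : List String) (vals : List (String × Int)) (cost : Int) (partial_ : List String) (sofar : Int) : Prop :=
  ∀ n ∈ names, ((PySem.Dict.mk vals).get? n).isSome = true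
instance (names : List String) (vals : List (String × Int)) (cost : Int) (partial_ : List String) (sofar : Int) : Decidable (Pre_opposite_knapsack names vals cost partial_ sofar) := by unfold Pre_opposite_knapsack; infer_instance

def pvWitness_opposite_knapsack : List String × (List (String × Int)) × Int × List String × Int :=
  (["a", "b"], [("a", 2), ("b", 1)], 2, [], 0)

def Spec_opposite_knapsack (names : List String) (vals : List (String × Int)) (cost : Int) (partial_ : List String) (sofar : Int) (out : List (List String)) : Prop := out = opposite_knapsack_alt names vals cost partial_ sofar
instance (names : List String) (vals : List (String × Int)) (cost : Int) (partial_ : List String) (sofar : Int) (out : List (List String)) : Decidable (Spec_opposite_knapsack names vals cost partial_ sofar out) := by unfold Spec_opposite_knapsack; infer_instance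

-- ===== CLAIM (what is proved, stated in full; the proofs are below) =====
def Claim_equal_opposite_knapsack : Prop := ∀ (names : List String) (vals : List (String × Int)) (cost : Int) (partial_ : List String) (sofar : Int), Dom_opposite_knapsack names vals cost partial_ sofar → Pre_opposite_knapsack names vals cost partial_ sofar → Spec_opposite_knapsack names vals cost partial_ sofar (opposite_knapsack names vals cost partial_ sofar)

-- ===== LEMMAS AND PROOFS =====

-- the recursive meaning of one work item
def okEval (vals : List (String × Int)) (cost : Int) : OkItem → List (List String)
  | .emit c => [c]
  | .state ns p s => opposite_knapsack ns vals cost p s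

-- loop invariant: the stack loop appends, to the accumulator, the concatenated meanings of the stack
theorem okLoop_eval (vals : List (String × Int)) (cost : Int) (items : List OkItem) (out : List (List String)) :
    okLoop vals cost items out = out ++ items.flatMap (okEval vals cost) := by
  fun_induction okLoop vals cost items out with
  | case1 out => simp
  | case2 c rest out ih => simp [okEval, ih]
  | case3 rest p s out ih => simp [okEval, ih, opposite_knapsack]
  | case4 name remaining p s rest out val candidate cur ih =>
    rw [ih]
    simp only [List.flatMap_cons, okEval]
    rw [opposite_knapsack]
    by_cases hvc : cost ≤ ((PySem.Dict.mk vals).get? name).getD 0 + s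
    · simp [cur, candidate, val, hvc]
    · simp [cur, candidate, val, hvc]

-- ===== VERDICT (by name: the statement is the Claim_ definition above) =====
theorem opposite_knapsack_spec : Claim_equal_opposite_knapsack := by
  intro names vals cost partial_ sofar _ _
  unfold Spec_opposite_knapsack opposite_knapsack_alt
  rw [okLoop_eval]
  simp [okEval]
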